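-- pv_equiv track=rewrite | github.com/SeetharamanM/VNBR-Road-Layers | app.py | segment_contained_in_intervals
-- ===== SOURCE A (Python) =====
-- def segment_contained_in_intervals(seg_start, seg_end, intervals):
--     """Check if segment [seg_start, seg_end] is fully contained in union of intervals."""
--     if not intervals:
--         return False
--     remaining = [(seg_start, seg_end)]
--     for (a, b) in sorted(intervals):
--         new_remaining = []
--         for (s, e) in remaining:
--             if e <= a or s >= b:
--                 new_remaining.append((s, e))
--             else:
--                 if s < a:
--                     new_remaining.append((s, min(e, a)))
--                 if e > b:
--                     new_remaining.append((max(s, b), e))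
--         remaining = [(s, e) for s, e in new_remaining if e > s]
--         if not remaining:
--             return True
--     return False
-- ===== SOURCE B (Python) =====
-- def segment_contained_in_intervals(seg_start, seg_end, intervals):
--     """Check if segment [seg_start, seg_end] is fully contained in union of intervals.
--
--     Single sweep over the sorted intervals tracking the furthest covered point."""
--     if not intervals:
--         return False
--     cur = seg_start
--     for a, b in sorted(intervals):
--         if cur >= seg_end:
--             return True
--         if a > cur:
--             return False
--         cur = max(cur, b)
--     return cur >= seg_end
-- ===== Notes on version B (the rewrite author's own statement) =====
-- stated objective: faster
-- what changed: Replaced the repeated subtract-interval-from-remaining-fragments loop (quadratic fragment bookkeeping) with the classic sort-then-single-sweep that only tracks the furthest covered point.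
import Mathlib
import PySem

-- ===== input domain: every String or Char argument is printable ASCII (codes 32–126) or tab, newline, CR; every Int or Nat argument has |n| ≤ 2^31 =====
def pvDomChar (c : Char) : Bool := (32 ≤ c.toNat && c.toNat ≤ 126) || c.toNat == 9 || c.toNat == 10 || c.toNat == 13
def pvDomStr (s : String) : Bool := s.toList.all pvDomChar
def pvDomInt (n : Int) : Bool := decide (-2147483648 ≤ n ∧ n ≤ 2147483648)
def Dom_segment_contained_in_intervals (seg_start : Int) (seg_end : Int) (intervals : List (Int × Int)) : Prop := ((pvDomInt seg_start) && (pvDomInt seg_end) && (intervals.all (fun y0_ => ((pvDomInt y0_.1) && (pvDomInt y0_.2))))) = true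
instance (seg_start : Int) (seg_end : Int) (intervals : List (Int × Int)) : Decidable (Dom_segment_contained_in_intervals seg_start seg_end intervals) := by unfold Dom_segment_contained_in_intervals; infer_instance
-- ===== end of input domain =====

-- B replaces A's repeated fragment-subtraction bookkeeping with the classic sort-then-sweep
-- tracking the furthest covered point; the return values are proved equal on all inputs.


-- ===== PORT A =====
-- inner `for (s, e) in remaining:` loop of A, building new_remaining in append order
def pvStepA (a b : Int) : List (Int × Int) → List (Int × Int)
  | [] => []
  | (s, e) :: rest =>
      (if e ≤ a ∨ s ≥ b then [(s, e)]
       else (if s < a then [(s, min e a)] else []) ++ (if e > b then [(max s b, e)] else []))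
      ++ pvStepA a b rest

-- outer `for (a, b) in sorted(intervals):` loop with the comprehension filter and early `return True`
def pvLoopA (rem : List (Int × Int)) : List (Int × Int) → Bool
  | [] => false
  | (a, b) :: t =>
      let rem' := (pvStepA a b rem).filter (fun p => p.2 > p.1)
      if rem' = [] then true else pvLoopA rem' t

def segment_contained_in_intervals (seg_start : Int) (seg_end : Int) (intervals : List (Int × Int)) : Bool :=
  if intervals = [] then false
  else pvLoopA [(seg_start, seg_end)] (PySem.List.sorted2 intervals Prod.fst Prod.snd)

-- ===== PORT B =====
-- B's sweep: `cur` is the furthest covered point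
def pvLoopB (segEnd : Int) (cur : Int) : List (Int × Int) → Bool
  | [] => decide (cur ≥ segEnd)
  | (a, b) :: t =>
      if cur ≥ segEnd then true
      else if a > cur then false
      else pvLoopB segEnd (max cur b) t

def segment_contained_in_intervals_alt (seg_start : Int) (seg_end : Int) (intervals : List (Int × Int)) : Bool :=
  if intervals = [] then false
  else pvLoopB seg_end seg_start (PySem.List.sorted2 intervals Prod.fst Prod.snd)

-- ===== PRECONDITION & SPEC =====
def Spec_segment_contained_in_intervals (seg_start : Int) (seg_end : Int) (intervals : List (Int × Int)) (out : Bool) : Prop := out = segment_contained_in_intervals_alt seg_start seg_end intervals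
instance (seg_start : Int) (seg_end : Int) (intervals : List (Int × Int)) (out : Bool) : Decidable (Spec_segment_contained_in_intervals seg_start seg_end intervals out) := by unfold Spec_segment_contained_in_intervals; infer_instance

-- ===== CLAIM (what is proved, stated in full; the proofs are below) =====
def Claim_equal_segment_contained_in_intervals : Prop := ∀ (seg_start : Int) (seg_end : Int) (intervals : List (Int × Int)), Dom_segment_contained_in_intervals seg_start seg_end intervals → Spec_segment_contained_in_intervals seg_start seg_end intervals (segment_contained_in_intervals seg_start seg_end intervals)

-- ===== LEMMAS AND PROOFS =====

-- x lies in the union of the half-open integer intervals [p.1, p.2) of the list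
def pvMemU (l : List (Int × Int)) (x : Int) : Prop := ∃ p ∈ l, p.1 ≤ x ∧ x < p.2

theorem pvLoopA_cons_eq (rem : List (Int × Int)) (a b : Int) (t : List (Int × Int)) :
    pvLoopA rem ((a, b) :: t) =
      (if (pvStepA a b rem).filter (fun p => p.2 > p.1) = [] then true
       else pvLoopA ((pvStepA a b rem).filter (fun p => p.2 > p.1)) t) := rfl

theorem pvLoopB_nil_eq (E cur : Int) : pvLoopB E cur [] = decide (cur ≥ E) := rfl

theorem pvLoopB_cons_eq (E cur a b : Int) (t : List (Int × Int)) :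
    pvLoopB E cur ((a, b) :: t) =
      (if cur ≥ E then true else if a > cur then false else pvLoopB E (max cur b) t) := rfl

theorem pvMemU_append (u v : List (Int × Int)) (x : Int) :
    pvMemU (u ++ v) x ↔ pvMemU u x ∨ pvMemU v x := by
  simp [pvMemU, List.mem_append, or_and_right, exists_or]

theorem pvMemU_cons (p : Int × Int) (l : List (Int × Int)) (x : Int) :
    pvMemU (p :: l) x ↔ (p.1 ≤ x ∧ x < p.2) ∨ pvMemU l x := by
  simp [pvMemU, List.mem_cons, or_and_right, exists_or]

theorem pvMemU_filter (l : List (Int × Int)) (x : Int) :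
    pvMemU (l.filter (fun p => p.2 > p.1)) x ↔ pvMemU l x := by
  simp only [pvMemU, List.mem_filter]
  constructor
  · rintro ⟨p, ⟨hp, _⟩, h⟩; exact ⟨p, hp, h⟩
  · rintro ⟨p, hp, h⟩; exact ⟨p, ⟨hp, by simp; omega⟩, h⟩

-- the fragments A keeps of one piece are exactly its points outside [a, b)
theorem pvMemU_piece (a b s e x : Int) :
    pvMemU (if e ≤ a ∨ s ≥ b then [(s, e)]
            else (if s < a then [(s, min e a)] else []) ++
                 (if e > b then [(max s b, e)] else [])) x ↔
      (s ≤ x ∧ x < e) ∧ ¬(a ≤ x ∧ x < b) := by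
  split_ifs with h1 h2 h3 <;> simp [pvMemU] <;> omega

-- one pass of A's subtraction loop removes exactly the points of [a, b)
theorem pvMemU_stepA (a b : Int) (l : List (Int × Int)) (x : Int) :
    pvMemU (pvStepA a b l) x ↔ pvMemU l x ∧ ¬(a ≤ x ∧ x < b) := by
  induction l with
  | nil => simp [pvStepA, pvMemU]
  | cons p rest ih =>
    obtain ⟨s, e⟩ := p
    show pvMemU (_ ++ pvStepA a b rest) x ↔ _
    rw [pvMemU_append, pvMemU_piece, ih, pvMemU_cons]
    tauto

theorem pvMemU_exists_of_proper (l : List (Int × Int)) (hne : l ≠ [])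
    (hprop : ∀ p ∈ l, p.1 < p.2) : ∃ x, pvMemU l x := by
  cases l with
  | nil => simp at hne
  | cons p rest =>
    exact ⟨p.1, p, List.mem_cons_self .., le_refl _, hprop p (List.mem_cons_self ..)⟩

-- A's outer loop returns True iff the remaining pieces are covered by the rest of the list
theorem pvLoopA_cons (t : List (Int × Int)) : ∀ (a b : Int) (rem : List (Int × Int)),
    (pvLoopA rem ((a, b) :: t) = true ↔ ∀ x, pvMemU rem x → pvMemU ((a, b) :: t) x) := by
  induction t with
  | nil =>
    intro a b rem
    rw [pvLoopA_cons_eq]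
    split_ifs with h
    · simp only [true_iff]
      intro x hx
      by_cases hab : a ≤ x ∧ x < b
      · exact ⟨(a, b), List.mem_cons_self .., hab⟩
      · exfalso
        have hmem : pvMemU ((pvStepA a b rem).filter (fun p => p.2 > p.1)) x :=
          (pvMemU_filter _ _).mpr ((pvMemU_stepA a b rem x).mpr ⟨hx, hab⟩)
        rw [h] at hmem
        obtain ⟨p, hp, _⟩ := hmem
        simp at hp
    · simp only [pvLoopA, Bool.false_eq_true, false_iff]
      intro hall
      obtain ⟨x, hx⟩ := pvMemU_exists_of_proper _ h
        (fun p hp => by have := List.of_mem_filter hp; simpa using this)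
      have hx' := (pvMemU_stepA a b rem x).mp ((pvMemU_filter _ _).mp hx)
      obtain ⟨q, hq, hxq⟩ := hall x hx'.1
      rcases List.mem_cons.mp hq with rfl | hq
      · exact hx'.2 hxq
      · simp at hq
  | cons hd t2 ih =>
    intro a b rem
    obtain ⟨a2, b2⟩ := hd
    rw [pvLoopA_cons_eq]
    split_ifs with h
    · simp only [true_iff]
      intro x hx
      by_cases hab : a ≤ x ∧ x < b
      · exact ⟨(a, b), List.mem_cons_self .., hab⟩
      · exfalso
        have hmem : pvMemU ((pvStepA a b rem).filter (fun p => p.2 > p.1)) x :=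
          (pvMemU_filter _ _).mpr ((pvMemU_stepA a b rem x).mpr ⟨hx, hab⟩)
        rw [h] at hmem
        obtain ⟨p, hp, _⟩ := hmem
        simp at hp
    · rw [ih a2 b2]
      constructor
      · intro H x hx
        by_cases hab : a ≤ x ∧ x < b
        · exact ⟨(a, b), List.mem_cons_self .., hab⟩
        · have hx' : pvMemU ((pvStepA a b rem).filter (fun p => p.2 > p.1)) x :=
            (pvMemU_filter _ _).mpr ((pvMemU_stepA a b rem x).mpr ⟨hx, hab⟩)
          obtain ⟨q, hq, hxq⟩ := H x hx'
          exact ⟨q, List.mem_cons_of_mem _ hq, hxq⟩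
      · intro H x hx
        have hx' := (pvMemU_stepA a b rem x).mp ((pvMemU_filter _ _).mp hx)
        obtain ⟨q, hq, hxq⟩ := H x hx'.1
        rcases List.mem_cons.mp hq with rfl | hq
        · exact absurd hxq hx'.2
        · exact ⟨q, hq, hxq⟩

-- B's sweep returns True iff every point of [cur, segEnd) is covered (needs sortedness)
theorem pvLoopB_iff (L : List (Int × Int)) : ∀ (cur E : Int),
    L.Pairwise (fun p q => p.1 ≤ q.1) →
    (pvLoopB E cur L = true ↔ ∀ x, cur ≤ x → x < E → pvMemU L x) := by
  induction L with
  | nil =>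
    intro cur E _
    rw [pvLoopB_nil_eq]
    simp only [pvMemU, decide_eq_true_eq]
    constructor
    · intro h x hx hxE; simp; omega
    · intro h; by_contra hc
      obtain ⟨p, hp, -⟩ := h cur le_rfl (by omega)
      simp at hp
  | cons p t ih =>
    rintro cur E hpw
    obtain ⟨a, b⟩ := p
    have hall : ∀ q ∈ t, a ≤ q.1 := (List.pairwise_cons.mp hpw).1
    have ht := (List.pairwise_cons.mp hpw).2
    rw [pvLoopB_cons_eq]
    split_ifs with h1 h2
    · simp only [true_iff]; intro x hx hxE; omega
    · simp only [false_iff]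
      intro H
      obtain ⟨q, hq, hxq⟩ := H cur le_rfl (by omega)
      rcases List.mem_cons.mp hq with rfl | hq
      · simp at hxq; omega
      · have := hall q hq; omega
    · rw [ih (max cur b) E ht]
      constructor
      · intro H x hx hxE
        by_cases hb : x < b
        · exact ⟨(a, b), List.mem_cons_self .., by omega, hb⟩
        · obtain ⟨q, hq, hxq⟩ := H x (by omega) hxE
          exact ⟨q, List.mem_cons_of_mem _ hq, hxq⟩
      · intro H x hx hxE
        obtain ⟨q, hq, hxq⟩ := H x (by omega) hxE
        rcases List.mem_cons.mp hq with rfl | hq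
        · simp at hxq; omega
        · exact ⟨q, hq, hxq⟩

-- insertion with sorted2's comparator preserves first-component monotonicity
theorem pvInsertBy_pw (before : Int × Int → Int × Int → Bool)
    (hb : ∀ p q, (before p q = true → p.1 ≤ q.1) ∧ (before p q = false → q.1 ≤ p.1)) :
    ∀ (l : List (Int × Int)) (x : Int × Int), l.Pairwise (fun p q => p.1 ≤ q.1) →
      (PySem.List.insertBy before x l).Pairwise (fun p q => p.1 ≤ q.1) := by
  intro l
  induction l with
  | nil => intro x _; simp [PySem.List.insertBy]
  | cons y ys ih =>
    intro x hpw
    obtain ⟨hy, hys⟩ := List.pairwise_cons.mp hpw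
    simp only [PySem.List.insertBy]
    split_ifs with h
    · refine List.pairwise_cons.mpr ⟨?_, hpw⟩
      intro z hz
      rcases List.mem_cons.mp hz with rfl | hz
      · exact (hb x z).1 h
      · exact le_trans ((hb x y).1 h) (hy z hz)
    · refine List.pairwise_cons.mpr ⟨?_, ih x hys⟩
      intro z hz
      rcases (PySem.List.mem_insertBy before x z ys).mp hz with rfl | hz
      · exact (hb z y).2 (by simpa using h)
      · exact hy z hz

theorem pvSorted2_pairwise_fst (xs : List (Int × Int)) :
    (PySem.List.sorted2 xs Prod.fst Prod.snd).Pairwise (fun p q => p.1 ≤ q.1) := by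
  show (List.foldl (fun acc x => PySem.List.insertBy _ x acc) [] xs).Pairwise _
  generalize hacc : ([] : List (Int × Int)) = acc
  have hpw : acc.Pairwise (fun p q : Int × Int => p.1 ≤ q.1) := by
    rw [← hacc]; exact List.Pairwise.nil
  clear hacc
  induction xs generalizing acc with
  | nil => simpa using hpw
  | cons x t ih =>
    simp only [List.foldl_cons]
    apply ih
    apply pvInsertBy_pw
    · intro p q
      constructor <;> intro h <;> simp at h <;> omega
    · exact hpw

-- ===== VERDICT (by name: the statement is the Claim_ definition above) =====
theorem segment_contained_in_intervals_spec : Claim_equal_segment_contained_in_intervals := by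
  intro seg_start seg_end intervals _
  unfold Spec_segment_contained_in_intervals
  unfold segment_contained_in_intervals segment_contained_in_intervals_alt
  split_ifs with h
  · rfl
  · have hpw := pvSorted2_pairwise_fst intervals
    have hperm := PySem.List.sorted2_perm intervals Prod.fst Prod.snd false
    generalize hgen : PySem.List.sorted2 intervals Prod.fst Prod.snd = S at hpw hperm ⊢
    have hSne : S ≠ [] := by
      intro hnil
      rw [hnil] at hperm
      exact h hperm.symm.eq_nil
    obtain ⟨p, t, rfl⟩ := List.exists_cons_of_ne_nil hSne
    obtain ⟨a, b⟩ := p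
    rw [Bool.eq_iff_iff]
    rw [pvLoopA_cons t a b [(seg_start, seg_end)]]
    rw [pvLoopB_iff ((a, b) :: t) seg_start seg_end hpw]
    constructor
    · intro H x hx hxE
      exact H x ⟨(seg_start, seg_end), List.mem_cons_self .., hx, hxE⟩
    · intro H x hx
      obtain ⟨q, hq, hxq⟩ := hx
      rcases List.mem_cons.mp hq with rfl | hq
      · exact H x hxq.1 hxq.2
      · simp at hq
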